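-- pv_equiv track=rewrite | github.com/ShayHill/transpose_docx_tables | main.py | _combine_headers
-- ===== SOURCE A (Python) =====
-- HEADER_SEPARATOR = " _ "
--
-- def _are_all_unique(seq):
--     """Check if all elements in a sequence are unique."""
--     return len(seq) == len(set(seq))
--
-- def _join_table_cell(cell):
--     """Join a cell into a single string."""
--     return "<br>".join(cell)
--
-- def _join_table_row_cells(row):
--     """Join each cell in a row into a single string."""
--     return [_join_table_cell(cell) for cell in row]
--
-- def _combine_headers(table):
--     """Combine headers into a single string.
--
--     Many tables are built
--
--     | header1  | header2  | header3  |
--     | ---------|----------|----------|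
--     | datum1   | datum2   | datum3   |
--
--     Other tables are built
--
--     | CATEGORY | CATEGORY | CATEGORY |
--     | ---------|----------|----------|
--     | header1  | header2  | header3  |
--     | datum1   | datum2   | datum3   |
--
--     Keep combining header rows until each column has a unique header. E.g.,
--     "CATEGORY _ header1", "CATEGORY _ header2", "CATEGORY _ header3"
--
--     Return the combined headers. This function has a side effect of removing the
--     header rows from the input table.
--     """
--     headers = _join_table_row_cells(table.pop(0))
--     while not _are_all_unique(headers):
--         try:
--             next_header_row = _join_table_row_cells(table.pop(0))
--         except IndexError:
--             msg = "Cannot create a unique header for each column."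
--             raise ValueError(msg)
--         headers = [HEADER_SEPARATOR.join(h) for h in zip(headers, next_header_row)]
--     return headers
-- ===== SOURCE B (Python) =====
-- HEADER_SEPARATOR = " _ "
--
--
-- def _combine_headers(table):
--     """Column-wise re-implementation: pop the first row, then for growing prefixes
--     of header rows build each column's joined header directly and stop at the
--     first prefix whose headers are all unique; finally delete exactly the extra
--     rows consumed.  Same in-place mutation of `table` as the original."""
--     joined = [["<br>".join(cell) for cell in table.pop(0)]]
--     for extra in range(len(table) + 1):
--         width = min(len(row) for row in joined)
--         headers = [HEADER_SEPARATOR.join(row[j] for row in joined) for j in range(width)]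
--         if len(headers) == len(set(headers)):
--             del table[:extra]
--             return headers
--         if extra < len(table):
--             joined.append(["<br>".join(cell) for cell in table[extra]])
--     msg = "Cannot create a unique header for each column."
--     raise ValueError(msg)
-- ===== Notes on version B (the rewrite author's own statement) =====
-- stated objective: alternative
-- what changed: A folds header rows pairwise, zipping the running headers with each next row; B instead pops only the first row, then for growing prefixes recomputes each column header directly from all prefix rows (truncated to the shortest row) and deletes the consumed rows at the end.
import Mathlib
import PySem

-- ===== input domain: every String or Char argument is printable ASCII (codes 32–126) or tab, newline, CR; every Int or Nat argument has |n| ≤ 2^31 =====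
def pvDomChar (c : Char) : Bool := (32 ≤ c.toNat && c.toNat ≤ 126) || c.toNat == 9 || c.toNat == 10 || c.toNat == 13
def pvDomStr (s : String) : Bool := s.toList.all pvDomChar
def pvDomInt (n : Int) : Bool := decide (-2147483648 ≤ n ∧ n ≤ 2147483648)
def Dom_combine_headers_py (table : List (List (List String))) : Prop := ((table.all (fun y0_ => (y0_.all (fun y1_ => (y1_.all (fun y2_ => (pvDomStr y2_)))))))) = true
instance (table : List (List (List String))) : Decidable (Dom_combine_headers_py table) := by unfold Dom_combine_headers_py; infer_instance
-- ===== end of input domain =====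

-- B recomputes each column header column-wise from the whole prefix of header rows instead of
-- folding rows pairwise as A does; same cost, alternative decomposition.  Both A and B mutate
-- `table` in place in Python (A pops each consumed row; B pops one row and deletes the rest at
-- the end) with the same net effect; the equivalence proved here is about the return value.

-- ===== PORT A =====
def pvJoinCell (cell : List String) : String := PySem.Str.join "<br>" cell

def pvJoinRow (row : List (List String)) : List String := row.map pvJoinCell

def pvAllUnique (h : List String) : Bool := h.length == (PySem.Set.ofList h).length

def pvZipJoin (headers next : List String) : List String :=
  (headers.zip next).map (fun p => PySem.Str.join " _ " [p.1, p.2])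

def pvLoopA (headers : List String) (rest : List (List (List String))) : List String :=
  if pvAllUnique headers then headers
  else
    match rest with
    | [] => []          -- table.pop(0) raises IndexError → ValueError; excluded by Pre_
    | r :: rs => pvLoopA (pvZipJoin headers (pvJoinRow r)) rs

def combine_headers_py (table : List (List (List String))) : List String :=
  match table with
  | [] => []            -- table.pop(0) raises IndexError; excluded by Pre_
  | r :: rs => pvLoopA (pvJoinRow r) rs

-- ===== PORT B =====
def pvWidth (joined : List (List String)) : Nat :=
  match joined with
  | [] => 0
  | r :: rs => rs.foldl (fun acc row => min acc row.length) r.length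

def pvHeadersOf (joined : List (List String)) : List String :=
  (List.range (pvWidth joined)).map
    (fun j => PySem.Str.join " _ " (joined.map (fun row => row.getD j "")))

def pvLoopB (joined : List (List String)) (rest : List (List (List String))) (extra : Nat) :
    List String :=
  let headers := pvHeadersOf joined
  if headers.length == (PySem.Set.ofList headers).length then headers
  else if h : extra < rest.length then
    pvLoopB (joined ++ [pvJoinRow (rest.getD extra [])]) rest (extra + 1)
  else []               -- loop exhausted: raise ValueError; excluded by Pre_
termination_by rest.length - extra

def combine_headers_py_alt (table : List (List (List String))) : List String :=
  match table with
  | [] => []            -- table.pop(0) raises IndexError; excluded by Pre_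
  | r :: rs => pvLoopB [pvJoinRow r] rs 0

-- ===== PRECONDITION & SPEC =====
-- Pre_ excludes exactly the inputs where A raises: the empty table (IndexError) and tables on
-- which no prefix of rows yields all-unique combined column headers (ValueError).
def Pre_combine_headers_py (table : List (List (List String))) : Prop :=
  table ≠ [] ∧ ∃ k ∈ List.range table.length,
    pvAllUnique (pvHeadersOf ((table.take (k + 1)).map pvJoinRow)) = true
instance (table : List (List (List String))) : Decidable (Pre_combine_headers_py table) := by
  unfold Pre_combine_headers_py; infer_instance

def pvWitness_combine_headers_py : List (List (List String)) := [[["h"]]]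

def Spec_combine_headers_py (table : List (List (List String))) (out : List String) : Prop := out = combine_headers_py_alt table
instance (table : List (List (List String))) (out : List String) : Decidable (Spec_combine_headers_py table out) := by unfold Spec_combine_headers_py; infer_instance

-- ===== CLAIM (what is proved, stated in full; the proofs are below) =====
def Claim_equal_combine_headers_py : Prop := ∀ (table : List (List (List String))), Dom_combine_headers_py table → Pre_combine_headers_py table → Spec_combine_headers_py table (combine_headers_py table)

-- ===== LEMMAS AND PROOFS =====

theorem pv_chars_join_snoc (sep y : List Char) (l : List (List Char)) (h : l ≠ []) :
    PySem.Chars.join sep (l ++ [y]) = PySem.Chars.join sep l ++ sep ++ y := by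
  induction l with
  | nil => exact absurd rfl h
  | cons x t ih =>
    cases t with
    | nil => simp [PySem.Chars.join_cons_cons, PySem.Chars.join_singleton]
    | cons z t' =>
      have e : (x :: z :: t') ++ [y] = x :: z :: (t' ++ [y]) := rfl
      rw [e, PySem.Chars.join_cons_cons,
        show (z :: (t' ++ [y])) = (z :: t') ++ [y] from rfl,
        ih (by simp), PySem.Chars.join_cons_cons]
      simp [List.append_assoc]

theorem pv_str_join_snoc (S y : String) (l : List String) (h : l ≠ []) :
    PySem.Str.join S (l ++ [y]) = PySem.Str.join S [PySem.Str.join S l, y] := by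
  apply String.toList_inj.mp
  rw [PySem.Str.toList_join, PySem.Str.toList_join, List.map_append]
  rw [show List.map String.toList [y] = [y.toList] from rfl]
  rw [pv_chars_join_snoc S.toList y.toList (l.map String.toList) (by simpa using h)]
  rw [show List.map String.toList [PySem.Str.join S l, y]
        = [(PySem.Str.join S l).toList, y.toList] from rfl]
  rw [PySem.Chars.join_cons_cons, PySem.Chars.join_singleton, PySem.Str.toList_join]

theorem pv_width_snoc (joined : List (List String)) (nh : List String) (h : joined ≠ []) :
    pvWidth (joined ++ [nh]) = min (pvWidth joined) nh.length := by
  cases joined with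
  | nil => exact absurd rfl h
  | cons r rs => simp [pvWidth, List.foldl_append]

theorem pv_str_join_singleton (S x : String) : PySem.Str.join S [x] = x := by
  apply String.toList_inj.mp
  rw [PySem.Str.toList_join]
  simp [PySem.Chars.join_singleton]

theorem pv_headersOf_single (row : List String) : pvHeadersOf [row] = row := by
  unfold pvHeadersOf
  simp [pvWidth, pv_str_join_singleton]
  apply List.ext_getElem <;> simp
  intro i h1 h2
  simp [List.getElem?_eq_getElem h2]

theorem pv_headersOf_snoc (joined : List (List String)) (nh : List String) (h : joined ≠ []) :
    pvHeadersOf (joined ++ [nh]) = pvZipJoin (pvHeadersOf joined) nh := by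
  apply List.ext_getElem
  · simp [pvHeadersOf, pvZipJoin, pv_width_snoc _ _ h]
  · intro j h1 h2
    have hw : j < pvWidth joined ∧ j < nh.length := by
      have := h1; simp [pvHeadersOf, pv_width_snoc _ _ h] at this; omega
    simp [pvHeadersOf, pvZipJoin, pv_width_snoc _ _ h, List.getElem_zip]
    rw [pv_str_join_snoc _ _ _ (by simpa using h)]
    congr 1
    simp [List.getElem?_eq_getElem hw.2]

theorem pv_loop_eq (rest : List (List (List String))) (extra : Nat)
    (joined : List (List String)) (h : joined ≠ []) :
    pvLoopB joined rest extra = pvLoopA (pvHeadersOf joined) (rest.drop extra) := by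
  induction hd : rest.length - extra generalizing extra joined with
  | zero =>
    have hle : rest.length ≤ extra := by omega
    rw [pvLoopB, pvLoopA.eq_def]
    simp [pvAllUnique, List.drop_eq_nil_of_le hle, Nat.not_lt.2 hle]
  | succ n ih =>
    have hlt : extra < rest.length := by omega
    rw [List.drop_eq_getElem_cons hlt, pvLoopB, pvLoopA]
    simp only [pvAllUnique]
    split_ifs with hc
    · rfl
    · rw [ih (extra + 1) _ (by simp) (by omega),
        List.getD_eq_getElem _ _ hlt, pv_headersOf_snoc _ _ h]

-- ===== VERDICT (by name: the statement is the Claim_ definition above) =====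
theorem combine_headers_py_spec : Claim_equal_combine_headers_py := by
  intro table _ _
  unfold Spec_combine_headers_py
  cases table with
  | nil => rfl
  | cons r rs =>
    simp only [combine_headers_py, combine_headers_py_alt]
    rw [pv_loop_eq rs 0 [pvJoinRow r] (by simp), pv_headersOf_single, List.drop_zero]
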